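-- pv_equiv track=rewrite | github.com/takeshiho0531/STEP2023 | first_week/homework2/save_sorted_dictionary.py | calculate_valid_word_score
-- ===== SOURCE A (Python) =====
-- SCORES = [
--     1,
--     3,
--     2,
--     2,
--     1,
--     3,
--     3,
--     1,
--     1,
--     4,
--     4,
--     2,
--     2,
--     1,
--     1,
--     3,
--     4,
--     1,
--     1,
--     1,
--     2,
--     3,
--     3,
--     4,
--     3,
--     4,
-- ]  # TODO: score_checker.pyにもある
--
-- def calculate_valid_word_score(valid_word):
--     data_table = [0] * 26
--     score = 0
--     for character in valid_word:
--         alpha_index = ord(character) - ord("a")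
--         data_table[alpha_index] += 1
--         score += SCORES[alpha_index] * 1
--     # ex. data="happy" -> data_table=[1, 0, 0, 0, 0, 0, 0, 1, 0, 0, 0, 0, 0, 0, 0, 2, 0, 0, 0, 0, 0, 0, 0, 0, 1, 0]
--     return score
-- ===== SOURCE B (Python) =====
-- SCORES = [1,3,2,2,1,3,3,1,1,4,4,2,2,1,1,3,4,1,1,1,2,3,3,4,3,4]
--
-- def calculate_valid_word_score(valid_word):
--     counts = [0] * 26
--     for character in valid_word:
--         counts[ord(character) - ord("a")] += 1
--     return sum(c * s for c, s in zip(counts, SCORES))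
-- ===== Notes on version B (the rewrite author's own statement) =====
-- stated objective: faster
-- what changed: A accumulates the score inside its single character scan; B instead fills a 26-slot frequency table in a counting pass and then computes the score in a second pass as the dot product of the table with SCORES (the per-character work drops to one counter increment).
import Mathlib
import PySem

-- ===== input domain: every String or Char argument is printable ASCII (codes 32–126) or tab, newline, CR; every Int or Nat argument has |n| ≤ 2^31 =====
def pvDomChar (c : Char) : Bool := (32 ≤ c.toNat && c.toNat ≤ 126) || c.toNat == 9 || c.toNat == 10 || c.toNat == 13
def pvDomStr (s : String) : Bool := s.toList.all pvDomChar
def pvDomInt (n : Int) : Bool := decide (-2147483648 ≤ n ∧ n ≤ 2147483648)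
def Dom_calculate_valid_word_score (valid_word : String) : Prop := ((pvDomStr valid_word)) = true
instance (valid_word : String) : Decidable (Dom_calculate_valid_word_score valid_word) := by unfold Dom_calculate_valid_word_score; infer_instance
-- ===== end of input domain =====

-- B splits A's single accumulate-as-you-scan loop into a counting pass over a 26-slot table
-- followed by a separate dot-product reduction against SCORES (objective: alternative decomposition).

-- ===== PORT A =====
def pvSCORES : List Int :=
  [1, 3, 2, 2, 1, 3, 3, 1, 1, 4, 4, 2, 2, 1, 1, 3, 4, 1, 1, 1, 2, 3, 3, 4, 3, 4]

-- the 'for character in valid_word' loop: state = (data_table, score); none = IndexError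
def pvLoopA : List Char → List Int → Int → Option (List Int × Int)
  | [], data_table, score => some (data_table, score)
  | character :: rest, data_table, score =>
      let alpha_index : Int := (character.toNat : Int) - 97
      match PySem.List.pyGet? data_table alpha_index with      -- read of data_table[alpha_index]
      | none => none
      | some v =>
        match PySem.List.pySet? data_table alpha_index (v + 1) with   -- write back += 1
        | none => none
        | some data_table' =>
          match PySem.List.pyGet? pvSCORES alpha_index with    -- SCORES[alpha_index]
          | none => none
          | some sc => pvLoopA rest data_table' (score + sc * 1)

def calculate_valid_word_score (valid_word : String) : Int :=
  match pvLoopA valid_word.toList (List.replicate 26 0) 0 with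
  | some (_, score) => score
  | none => 0        -- unreachable under Pre_ (Python raises IndexError here)

-- ===== PORT B =====
-- counting pass: counts[ord(c) - 97] += 1 for each character; none = IndexError
def pvLoopB : List Char → List Int → Option (List Int)
  | [], counts => some counts
  | character :: rest, counts =>
      let idx : Int := (character.toNat : Int) - 97
      match PySem.List.pyGet? counts idx with
      | none => none
      | some v =>
        match PySem.List.pySet? counts idx (v + 1) with
        | none => none
        | some counts' => pvLoopB rest counts'

def calculate_valid_word_score_alt (valid_word : String) : Int :=
  match pvLoopB valid_word.toList (List.replicate 26 0) with
  | some counts => ((counts.zip pvSCORES).map (fun p => p.1 * p.2)).sum   -- sum(c*s for c,s in zip(counts, SCORES))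
  | none => 0        -- unreachable under Pre_ (Python raises IndexError here)

-- ===== PRECONDITION & SPEC =====
-- Pre_ excludes exactly the inputs on which Python A raises IndexError: characters whose
-- table index ord(c) - 97 falls outside [-26, 25] (both A and B raise there alike).
def Pre_calculate_valid_word_score (valid_word : String) : Prop :=
  (valid_word.toList.all (fun c => 71 ≤ c.toNat && c.toNat ≤ 122)) = true
instance (valid_word : String) : Decidable (Pre_calculate_valid_word_score valid_word) := by
  unfold Pre_calculate_valid_word_score; infer_instance
def pvWitness_calculate_valid_word_score : String := "ha"

def Spec_calculate_valid_word_score (valid_word : String) (out : Int) : Prop := out = calculate_valid_word_score_alt valid_word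
instance (valid_word : String) (out : Int) : Decidable (Spec_calculate_valid_word_score valid_word out) := by unfold Spec_calculate_valid_word_score; infer_instance

-- ===== CLAIM (what is proved, stated in full; the proofs are below) =====
def Claim_equal_calculate_valid_word_score : Prop := ∀ (valid_word : String), Dom_calculate_valid_word_score valid_word → Pre_calculate_valid_word_score valid_word → Spec_calculate_valid_word_score valid_word (calculate_valid_word_score valid_word)

-- ===== LEMMAS AND PROOFS =====

-- dot product helper used only by the proofs
def pvDot (xs ys : List Int) : Int := ((xs.zip ys).map (fun p => p.1 * p.2)).sum

theorem pvDot_set (xs : List Int) (ys : List Int) (j : Nat) (v : Int)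
    (hx : j < xs.length) (hy : j < ys.length) :
    pvDot (xs.set j v) ys = pvDot xs ys - xs[j] * ys[j] + v * ys[j] := by
  induction xs generalizing j ys with
  | nil => simp at hx
  | cons x xs ih =>
    cases ys with
    | nil => simp at hy
    | cons y ys =>
      cases j with
      | zero => simp [pvDot]; ring
      | succ j =>
        simp only [List.set_cons_succ, pvDot, List.zip_cons_cons, List.map_cons, List.sum_cons,
          List.getElem_cons_succ]
        have := ih ys j (by simpa using hx) (by simpa using hy)
        simp only [pvDot] at this
        rw [this]; ring

-- loop invariant: A's loop returns B's table together with the running dot product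
theorem pvLoop_agree (cs : List Char) (tbl : List Int) (score : Int) (hlen : tbl.length = 26) :
    pvLoopA cs tbl score =
      (pvLoopB cs tbl).map (fun cnt => (cnt, score + pvDot cnt pvSCORES - pvDot tbl pvSCORES)) := by
  induction cs generalizing tbl score with
  | nil => simp [pvLoopA, pvLoopB]
  | cons c cs ih =>
    simp only [pvLoopA, pvLoopB]
    have hS : pvSCORES.length = 26 := by decide
    set idx : Int := (c.toNat : Int) - 97 with hidx
    match hk : PySem.List.pyIdx? (26 : Nat) idx with
    | none =>
        simp [PySem.List.pyGet?, hlen, hk]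
    | some j =>
        have hj : j < 26 := by
          simp only [PySem.List.pyIdx?] at hk
          split_ifs at hk with h1 h2 h3 <;> simp_all <;> omega
        have hget : PySem.List.pyGet? tbl idx = some (tbl[j]'(by omega)) := by
          simp [PySem.List.pyGet?, hlen, hk, List.getElem?_eq_getElem (by omega : j < tbl.length)]
        have hset : PySem.List.pySet? tbl idx (tbl[j]'(by omega) + 1) = some (tbl.set j (tbl[j]'(by omega) + 1)) := by
          simp [PySem.List.pySet?, hlen, hk]
        have hsc : PySem.List.pyGet? pvSCORES idx = some (pvSCORES[j]'(by omega)) := by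
          simp [PySem.List.pyGet?, hS, hk, List.getElem?_eq_getElem (by omega : j < pvSCORES.length)]
        simp only [hget, hset, hsc]
        rw [ih (tbl.set j (tbl[j]'(by omega) + 1)) (score + pvSCORES[j]'(by omega) * 1)
            (by simpa using hlen)]
        have hdot : pvDot (tbl.set j (tbl[j]'(by omega) + 1)) pvSCORES
            = pvDot tbl pvSCORES + pvSCORES[j]'(by omega) := by
          rw [pvDot_set tbl pvSCORES j _ (by omega) (by omega)]; ring
        match hb : pvLoopB cs (tbl.set j (tbl[j]'(by omega) + 1)) with
        | none => simp
        | some cnt =>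
            simp only [Option.map_some]
            congr 1
            rw [hdot]; ring_nf

-- ===== VERDICT (by name: the statement is the Claim_ definition above) =====
theorem calculate_valid_word_score_spec : Claim_equal_calculate_valid_word_score := by
  intro w _ _
  unfold Spec_calculate_valid_word_score calculate_valid_word_score calculate_valid_word_score_alt
  rw [pvLoop_agree w.toList (List.replicate 26 0) 0 (by simp)]
  match hb : pvLoopB w.toList (List.replicate 26 0) with
  | none => simp
  | some cnt =>
      simp only [Option.map_some]
      have : pvDot (List.replicate 26 0) pvSCORES = 0 := by decide
      rw [this]; simp [pvDot]
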